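-- pv_equiv track=rewrite | github.com/tonigineer/Advent-Of-Code | 2015/01/1.py | part1
-- ===== SOURCE A (Python) =====
-- def part1(data):
--     """Simply count up and downs."""
--     floor = 0
--     for char in data:
--         if char == "(":
--             floor += 1
--         elif char == ")":
--             floor -= 1
--         else:
--             raise ValueError('alles kaputt oO')
--     return floor
-- ===== SOURCE B (Python) =====
-- def part1(data):
--     """Validate first, then count in two bulk passes instead of one interleaved loop."""
--     for char in data:
--         if char not in "()":
--             raise ValueError('alles kaputt oO')
--     return data.count("(") - data.count(")")
-- ===== Notes on version B (the rewrite author's own statement) =====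
-- stated objective: idiomatic
-- what changed: Replaces the single interleaved accumulate-or-raise loop by a validation pass followed by two bulk str.count passes (count('(') - count(')')), keeping the identical ValueError on invalid characters.
import Mathlib
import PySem

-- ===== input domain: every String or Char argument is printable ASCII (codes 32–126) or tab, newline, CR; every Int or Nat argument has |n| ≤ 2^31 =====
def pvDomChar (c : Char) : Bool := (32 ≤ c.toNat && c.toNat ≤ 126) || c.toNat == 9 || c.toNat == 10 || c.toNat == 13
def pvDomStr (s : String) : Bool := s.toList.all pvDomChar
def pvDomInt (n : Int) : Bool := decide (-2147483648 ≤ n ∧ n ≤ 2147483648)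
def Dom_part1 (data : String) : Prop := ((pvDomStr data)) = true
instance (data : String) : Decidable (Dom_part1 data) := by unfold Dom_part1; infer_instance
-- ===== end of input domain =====

-- B replaces A's single accumulate-or-raise loop by a validation pass followed by two bulk
-- count passes; objective: idiomatic/simpler decomposition (same cost, no speed claim).

-- ===== PORT A =====
-- literal port of A's loop; none = the ValueError path (excluded by Pre_part1)
def part1Loop : List Char → Int → Option Int
  | [], floor => some floor
  | c :: rest, floor =>
    if c = '(' then part1Loop rest (floor + 1)
    else if c = ')' then part1Loop rest (floor - 1)
    else none

def part1 (data : String) : Int := (part1Loop data.toList 0).getD 0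

-- ===== PORT B =====
-- B's validation loop: 'for char in data: if char not in "()": raise'
def part1AltCheck : List Char → Bool
  | [] => true
  | c :: rest => PySem.Chars.isIn [c] ['(', ')'] && part1AltCheck rest

-- if validation fails B raises (excluded by Pre_part1); else the two bulk counts
def part1_alt (data : String) : Int :=
  if part1AltCheck data.toList then
    (PySem.Str.count data "(" : Int) - (PySem.Str.count data ")" : Int)
  else 0

-- ===== PRECONDITION & SPEC =====
-- Pre_ excludes exactly the inputs containing a character other than '(' or ')', on which
-- the Python A raises ValueError('alles kaputt oO') and returns no value.
def Pre_part1 (data : String) : Prop := (data.toList.all (fun c => c == '(' || c == ')')) = true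
instance (data : String) : Decidable (Pre_part1 data) := by unfold Pre_part1; infer_instance

def pvWitness_part1 : String := "(())("

def Spec_part1 (data : String) (out : Int) : Prop := out = part1_alt data
instance (data : String) (out : Int) : Decidable (Spec_part1 data out) := by unfold Spec_part1; infer_instance

-- ===== CLAIM (what is proved, stated in full; the proofs are below) =====
def Claim_equal_part1 : Prop := ∀ (data : String), Dom_part1 data → Pre_part1 data → Spec_part1 data (part1 data)

-- ===== LEMMAS AND PROOFS =====

-- Chars.count with a single-character needle is List.count
theorem count_go_single (c : Char) : ∀ (l : List Char) (fuel acc : Nat), l.length ≤ fuel →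
    PySem.Chars.count.go [c] fuel l acc = acc + l.count c := by
  intro l
  induction l with
  | nil => intro fuel acc _; cases fuel <;> simp [PySem.Chars.count.go]
  | cons h t ih =>
    intro fuel acc hle
    cases fuel with
    | zero => simp at hle
    | succ f =>
      have hle' : t.length ≤ f := by simpa using hle
      by_cases hc : h = c
      · subst hc
        simp [PySem.Chars.count.go, List.isPrefixOf, ih f (acc + 1) hle']
        try omega
      · have hpre : List.isPrefixOf [c] (h :: t) = false := by
          simp [List.isPrefixOf]; exact fun hh => absurd hh.symm hc
        simp [PySem.Chars.count.go, hpre, ih f acc hle', hc]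
        try exact fun hh => absurd hh.symm hc

theorem count_single (s : List Char) (c : Char) :
    PySem.Chars.count s [c] = s.count c := by
  simpa using count_go_single c s s.length 0 le_rfl

theorem part1Loop_of_valid : ∀ (cs : List Char) (f : Int), (∀ c ∈ cs, c = '(' ∨ c = ')') →
    part1Loop cs f = some (f + cs.count '(' - cs.count ')') := by
  intro cs
  induction cs with
  | nil => intro f _; simp [part1Loop]
  | cons h t ih =>
    intro f hall
    rcases hall h (by simp) with hh | hh <;> subst hh <;>
      simp [part1Loop, ih _ (fun c hc => hall c (by simp [hc]))] <;> ring_nf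

theorem check_of_valid : ∀ (cs : List Char), (∀ c ∈ cs, c = '(' ∨ c = ')') →
    part1AltCheck cs = true := by
  intro cs
  induction cs with
  | nil => intro _; rfl
  | cons h t ih =>
    intro hall
    rcases hall h (by simp) with hh | hh <;> subst hh <;>
      simp [part1AltCheck, ih (fun c hc => hall c (by simp [hc]))] <;> decide

-- ===== VERDICT (by name: the statement is the Claim_ definition above) =====
theorem part1_spec : Claim_equal_part1 := by
  intro data _ hpreb
  have hpre : ∀ c ∈ data.toList, c = '(' ∨ c = ')' := by
    intro c hc
    have := List.all_eq_true.mp hpreb c hc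
    simpa [Bool.or_eq_true, beq_iff_eq] using this
  unfold Spec_part1 part1 part1_alt
  rw [part1Loop_of_valid data.toList 0 hpre, check_of_valid data.toList hpre]
  simp [PySem.Str.count_eq, count_single]
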